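-- pv_equiv track=rewrite | github.com/Marshal1101/DataStructure-Algorithm-Study | baekjoon/ImplementationQuestion2/071-1113-수영장만들기.py | chk_bfs
-- ===== SOURCE A (Python) =====
-- def chk_bfs(num:int, si:int, sj:int, delta:list, N:int, M:int, board:list[list], visited:set):
--     cnt = 1
--     is_hole = False
--     stk = [(si, sj)]
--     visited.add((si, sj))
--     while stk:
--         new_stk = []
--         while stk:
--             ci, cj = stk.pop()
--             for d in range(4):
--                 ni = ci + delta[d][0]
--                 nj = cj + delta[d][1]
--                 if ni < 0 or ni >= N or nj < 0 or nj >= M: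
--                     is_hole = True
--                     continue
--
--                 if (ni, nj) in visited:
--                     continue
--
--                 if board[ni][nj] <= num:
--                     visited.add((ni, nj))
--                     new_stk.append((ni, nj))
--                     cnt += 1
--
--         stk = new_stk
--
--     if not is_hole:
--         return cnt
--     else:
--         return 0
-- ===== SOURCE B (Python) =====
-- def _neighbors(ci, cj, delta):
--     # the four delta-shifted coordinates of (ci, cj)
--     return [(ci + delta[d][0], cj + delta[d][1]) for d in range(4)]
--
-- def _inside(N, M, p):
--     return 0 <= p[0] < N and 0 <= p[1] < M
--
-- def _expand(num, delta, N, M, board, visited, frontier):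
--     # discover the next ring of the component; mutates visited
--     found = []
--     for cell in reversed(frontier):
--         for p in _neighbors(cell[0], cell[1], delta):
--             if _inside(N, M, p) and p not in visited and board[p[0]][p[1]] <= num:
--                 visited.add(p)
--                 found.append(p)
--     return found
--
-- def _touches_border(delta, N, M, comp):
--     # does any component cell have a delta-neighbour outside the grid?
--     return any(not _inside(N, M, p)
--                for c in comp for p in _neighbors(c[0], c[1], delta))
--
-- def chk_bfs(num: int, si: int, sj: int, delta: list, N: int, M: int, board: list, visited: set):
--     # Collect the component ring by ring, then classify it in a separate pass.
--     visited.add((si, sj))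
--     comp = [(si, sj)]
--     frontier = [(si, sj)]
--     while frontier:
--         frontier = _expand(num, delta, N, M, board, visited, frontier)
--         comp.extend(frontier)
--     return 0 if _touches_border(delta, N, M, comp) else len(comp)
-- ===== Notes on version B (the rewrite author's own statement) =====
-- stated objective: alternative
-- what changed: B splits A's monolithic level-batched loop with inline cnt/is_hole bookkeeping into small helpers: a neighbour-list generator, a ring expansion that only returns newly discovered cells, and a separate post-hoc border-classification pass (return 0 if any component cell has an out-of-grid neighbour, else the component length).
import Mathlib
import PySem

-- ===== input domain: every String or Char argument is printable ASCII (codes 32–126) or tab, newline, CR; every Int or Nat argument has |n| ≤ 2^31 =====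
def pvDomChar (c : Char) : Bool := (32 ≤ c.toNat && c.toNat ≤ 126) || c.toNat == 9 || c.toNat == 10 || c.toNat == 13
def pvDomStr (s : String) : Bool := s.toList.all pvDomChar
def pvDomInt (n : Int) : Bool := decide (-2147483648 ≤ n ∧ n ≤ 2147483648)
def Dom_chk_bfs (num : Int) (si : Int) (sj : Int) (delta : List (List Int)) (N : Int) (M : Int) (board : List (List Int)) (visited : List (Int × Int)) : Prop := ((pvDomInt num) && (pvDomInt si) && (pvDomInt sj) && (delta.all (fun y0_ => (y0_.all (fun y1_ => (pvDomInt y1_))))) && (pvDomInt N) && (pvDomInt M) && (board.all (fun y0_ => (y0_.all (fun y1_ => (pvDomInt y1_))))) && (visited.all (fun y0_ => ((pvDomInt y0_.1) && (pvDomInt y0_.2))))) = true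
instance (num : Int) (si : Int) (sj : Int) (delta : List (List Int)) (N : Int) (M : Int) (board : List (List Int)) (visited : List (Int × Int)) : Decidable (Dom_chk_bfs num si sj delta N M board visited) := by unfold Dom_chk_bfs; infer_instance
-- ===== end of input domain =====

-- B decomposes A's monolithic level-batched loop (inline cnt/is_hole bookkeeping) into small
-- helpers: a neighbour-list generator, a ring-expansion step returning only the newly found
-- cells, and a separate post-hoc border-classification pass (objective: alternative
-- decomposition, no speed claim). Both A and B mutate `visited` identically (they add the
-- same cells); the equivalence proved here is about the RETURN value.

-- ===== PORT A =====
-- one direction d of A's `for d in range(4)` body (state: visited, new_stk, cnt, is_hole)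
def pvDirA (num : Int) (delta : List (List Int)) (N : Int) (M : Int) (board : List (List Int))
    (c : Int × Int) (st : PySem.Set (Int × Int) × List (Int × Int) × Int × Bool) (d : Int) :
    PySem.Set (Int × Int) × List (Int × Int) × Int × Bool :=
  let ni := c.1 + ((PySem.List.pyGet? ((PySem.List.pyGet? delta d).getD []) 0).getD 0)
  let nj := c.2 + ((PySem.List.pyGet? ((PySem.List.pyGet? delta d).getD []) 1).getD 0)
  if ni < 0 ∨ N ≤ ni ∨ nj < 0 ∨ M ≤ nj then (st.1, st.2.1, st.2.2.1, true)
  else if (ni, nj) ∈ st.1 then st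
  else if (PySem.List.pyGet? ((PySem.List.pyGet? board ni).getD []) nj).getD 0 ≤ num then
    (PySem.Set.add st.1 (ni, nj), st.2.1 ++ [(ni, nj)], st.2.2.1 + 1, st.2.2.2)
  else st

-- processing of one popped cell `ci, cj = stk.pop()`
def pvStepA (num : Int) (delta : List (List Int)) (N : Int) (M : Int) (board : List (List Int))
    (st : PySem.Set (Int × Int) × List (Int × Int) × Int × Bool) (c : Int × Int) :
    PySem.Set (Int × Int) × List (Int × Int) × Int × Bool :=
  (PySem.List.pyRange 0 4 1).foldl (pvDirA num delta N M board c) st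

-- A's outer `while stk:` loop; the inner `while stk: stk.pop()` pops from the back, i.e. it
-- processes stk in reverse order while new_stk/cnt/is_hole accumulate; fuel only makes the
-- outer loop total (it provably never runs out, see `pvFree_le_grid` and `pv_main` below)
def pvLoopA (num : Int) (delta : List (List Int)) (N : Int) (M : Int) (board : List (List Int)) :
    Nat → List (Int × Int) → PySem.Set (Int × Int) → Int → Bool → Int
  | _, [], _, cnt, hole => if hole then 0 else cnt
  | 0, _ :: _, _, cnt, hole => if hole then 0 else cnt
  | f + 1, a :: stk, vis, cnt, hole =>
      let r := ((a :: stk).reverse).foldl (pvStepA num delta N M board)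
                 (vis, ([] : List (Int × Int)), cnt, hole)
      pvLoopA num delta N M board f r.2.1 r.1 r.2.2.1 r.2.2.2

def chk_bfs (num : Int) (si : Int) (sj : Int) (delta : List (List Int)) (N : Int) (M : Int) (board : List (List Int)) (visited : List (Int × Int)) : Int :=
  let vis := PySem.Set.add visited (si, sj)
  pvLoopA num delta N M board (N.toNat * M.toNat + 1) [(si, sj)] vis 1 false

-- ===== PORT B =====
-- `_neighbors(ci, cj, delta)`
def pvNbrs (delta : List (List Int)) (ci cj : Int) : List (Int × Int) :=
  (PySem.List.pyRange 0 4 1).map (fun d =>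
    (ci + ((PySem.List.pyGet? ((PySem.List.pyGet? delta d).getD []) 0).getD 0),
     cj + ((PySem.List.pyGet? ((PySem.List.pyGet? delta d).getD []) 1).getD 0)))

-- `_inside(N, M, p)`
def pvInside (N M : Int) (p : Int × Int) : Bool :=
  decide (0 ≤ p.1 ∧ p.1 < N ∧ 0 ≤ p.2 ∧ p.2 < M)

-- body of `_expand`'s inner `for p in _neighbors(...)` (state: visited, found)
def pvTryAdd (num : Int) (N M : Int) (board : List (List Int))
    (st : PySem.Set (Int × Int) × List (Int × Int)) (p : Int × Int) :
    PySem.Set (Int × Int) × List (Int × Int) :=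
  if pvInside N M p ∧ p ∉ st.1 ∧
      (PySem.List.pyGet? ((PySem.List.pyGet? board p.1).getD []) p.2).getD 0 ≤ num then
    (PySem.Set.add st.1 p, st.2 ++ [p])
  else st

-- `_expand(num, delta, N, M, board, visited, frontier)`
def pvExpand (num : Int) (delta : List (List Int)) (N M : Int) (board : List (List Int))
    (vis : PySem.Set (Int × Int)) (frontier : List (Int × Int)) :
    PySem.Set (Int × Int) × List (Int × Int) :=
  frontier.reverse.foldl
    (fun st cell => (pvNbrs delta cell.1 cell.2).foldl (pvTryAdd num N M board) st)
    (vis, [])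

-- B's `while frontier:` loop, returning all cells discovered after the initial one
-- (comp = start :: this list); fuel makes it total, it provably never runs out
def pvFill (num : Int) (delta : List (List Int)) (N M : Int) (board : List (List Int)) :
    Nat → List (Int × Int) → PySem.Set (Int × Int) → List (Int × Int)
  | _, [], _ => []
  | 0, _ :: _, _ => []
  | f + 1, a :: fr, vis =>
      let r := pvExpand num delta N M board vis (a :: fr)
      r.2 ++ pvFill num delta N M board f r.2 r.1

-- one cell's clause of `_touches_border`
def pvBorderCell (delta : List (List Int)) (N M : Int) (c : Int × Int) : Bool :=
  (pvNbrs delta c.1 c.2).any (fun p => ! pvInside N M p)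

def chk_bfs_alt (num : Int) (si : Int) (sj : Int) (delta : List (List Int)) (N : Int) (M : Int) (board : List (List Int)) (visited : List (Int × Int)) : Int :=
  let vis := PySem.Set.add visited (si, sj)
  let comp := (si, sj) :: pvFill num delta N M board (N.toNat * M.toNat + 1) [(si, sj)] vis
  if comp.any (pvBorderCell delta N M) then 0 else (comp.length : Int)

-- ===== PRECONDITION & SPEC =====
-- Pre_ excludes the inputs on which Python A raises IndexError: delta must offer four
-- direction rows of length ≥ 2, and the board must materialize the first N rows with ≥ M
-- entries each (irrelevant when N ≤ 0 or M ≤ 0: no cell is in bounds, the board is never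
-- indexed, and likewise when every delta-neighbour of the start lies off-grid: the fill stops
-- at the start cell).  The board clause is slightly conservative: on a too-short/ragged board whose
-- missing cells the flood fill never reaches, A still returns (see cites in claim.json).
def Pre_chk_bfs (num : Int) (si : Int) (sj : Int) (delta : List (List Int)) (N : Int) (M : Int) (board : List (List Int)) (visited : List (Int × Int)) : Prop :=
  4 ≤ delta.length ∧ (∀ r ∈ delta.take 4, 2 ≤ r.length) ∧
  (0 < N → 0 < M →
    (N ≤ (board.length : Int) ∧ (∀ r ∈ board.take N.toNat, M ≤ (r.length : Int))) ∨
    (∀ r ∈ delta.take 4, si + r.headI < 0 ∨ N ≤ si + r.headI ∨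
      sj + r.getD 1 0 < 0 ∨ M ≤ sj + r.getD 1 0))
instance (num : Int) (si : Int) (sj : Int) (delta : List (List Int)) (N : Int) (M : Int) (board : List (List Int)) (visited : List (Int × Int)) : Decidable (Pre_chk_bfs num si sj delta N M board visited) := by unfold Pre_chk_bfs; infer_instance

def pvWitness_chk_bfs : Int × Int × Int × List (List Int) × Int × Int × List (List Int) × (List (Int × Int)) :=
  (0, 0, 0, [[-1, 0], [1, 0], [0, -1], [0, 1]], 2, 2, [[0, 1], [1, 0]], [])

def Spec_chk_bfs (num : Int) (si : Int) (sj : Int) (delta : List (List Int)) (N : Int) (M : Int) (board : List (List Int)) (visited : List (Int × Int)) (out : Int) : Prop := out = chk_bfs_alt num si sj delta N M board visited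
instance (num : Int) (si : Int) (sj : Int) (delta : List (List Int)) (N : Int) (M : Int) (board : List (List Int)) (visited : List (Int × Int)) (out : Int) : Decidable (Spec_chk_bfs num si sj delta N M board visited out) := by unfold Spec_chk_bfs; infer_instance

-- ===== CLAIM (what is proved, stated in full; the proofs are below) =====
def Claim_equal_chk_bfs : Prop := ∀ (num : Int) (si : Int) (sj : Int) (delta : List (List Int)) (N : Int) (M : Int) (board : List (List Int)) (visited : List (Int × Int)), Dom_chk_bfs num si sj delta N M board visited → Pre_chk_bfs num si sj delta N M board visited → Spec_chk_bfs num si sj delta N M board visited (chk_bfs num si sj delta N M board visited)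

-- ===== LEMMAS AND PROOFS =====

-- the in-bounds grid and the number of its cells not yet visited
noncomputable def pvBox (N M : Int) : Finset (Int × Int) := Finset.Icc 0 (N - 1) ×ˢ Finset.Icc 0 (M - 1)
noncomputable def pvFree (N M : Int) (vis : List (Int × Int)) : Nat :=
  ((pvBox N M).filter (fun c => c ∉ vis)).card

theorem pvFree_add_lt (N M : Int) (vis : List (Int × Int)) (x : Int × Int)
    (hx : x ∈ pvBox N M) (hnx : x ∉ vis) :
    pvFree N M (PySem.Set.add vis x) + 1 ≤ pvFree N M vis := by
  have hset : (pvBox N M).filter (fun c => c ∉ PySem.Set.add vis x) =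
      ((pvBox N M).filter (fun c => c ∉ vis)).erase x := by
    ext y
    simp only [Finset.mem_erase, Finset.mem_filter, PySem.Set.mem_add]
    tauto
  have hx' : x ∈ (pvBox N M).filter (fun c => c ∉ vis) := Finset.mem_filter.mpr ⟨hx, hnx⟩
  have hcard := Finset.card_erase_of_mem hx'
  have hpos : 0 < ((pvBox N M).filter (fun c => c ∉ vis)).card := Finset.card_pos.mpr ⟨x, hx'⟩
  unfold pvFree
  rw [hset, hcard]
  omega

theorem pvFree_le_grid (N M : Int) (vis : List (Int × Int)) :
    pvFree N M vis ≤ N.toNat * M.toNat := by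
  have h1 : pvFree N M vis ≤ (pvBox N M).card := Finset.card_filter_le _ _
  have h2 : (pvBox N M).card = N.toNat * M.toNat := by
    unfold pvBox
    rw [Finset.card_product, Int.card_Icc, Int.card_Icc]
    congr 1 <;> omega
  exact le_trans h1 (le_of_eq h2)

-- one direction: A's body and B's `pvTryAdd` on that neighbour move the shared visited set
-- identically, push the same (≤ 1) cell, and A's is_hole gains exactly `not _inside`
theorem pv_dir (num : Int) (delta : List (List Int)) (N M : Int) (board : List (List Int))
    (c : Int × Int) (d : Int) (vis : List (Int × Int)) :
    ∃ (δ : List (Int × Int)) (vis' : List (Int × Int)),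
      (∀ newA cnt hole, pvDirA num delta N M board c (vis, newA, cnt, hole) d =
        (vis', newA ++ δ, cnt + (δ.length : Int), hole ||
          (! pvInside N M (c.1 + ((PySem.List.pyGet? ((PySem.List.pyGet? delta d).getD []) 0).getD 0),
                           c.2 + ((PySem.List.pyGet? ((PySem.List.pyGet? delta d).getD []) 1).getD 0))))) ∧
      (∀ found, pvTryAdd num N M board (vis, found)
          (c.1 + ((PySem.List.pyGet? ((PySem.List.pyGet? delta d).getD []) 0).getD 0),
           c.2 + ((PySem.List.pyGet? ((PySem.List.pyGet? delta d).getD []) 1).getD 0)) =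
        (vis', found ++ δ)) ∧
      pvFree N M vis' + δ.length ≤ pvFree N M vis := by
  set ni := c.1 + ((PySem.List.pyGet? ((PySem.List.pyGet? delta d).getD []) 0).getD 0) with hni
  set nj := c.2 + ((PySem.List.pyGet? ((PySem.List.pyGet? delta d).getD []) 1).getD 0) with hnj
  by_cases h1 : ni < 0 ∨ N ≤ ni ∨ nj < 0 ∨ M ≤ nj
  · refine ⟨[], vis, fun newA cnt hole => ?_, fun found => ?_, by simp⟩
    · simp only [pvDirA, ← hni, ← hnj]
      rw [if_pos h1]
      have hout : pvInside N M (ni, nj) = false := by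
        simp only [pvInside]; exact decide_eq_false (by omega)
      simp [hout]
    · simp only [pvTryAdd, pvInside]
      rw [if_neg (by rintro ⟨ha, -⟩; simp at ha; rcases h1 with h | h | h | h <;> omega)]
      simp
  · push Not at h1
    obtain ⟨g1, g2, g3, g4⟩ := h1
    have hin : pvInside N M (ni, nj) = true := by
      simp only [pvInside]; exact decide_eq_true (by exact ⟨g1, g2, g3, g4⟩)
    have hnotOOB : ¬ (ni < 0 ∨ N ≤ ni ∨ nj < 0 ∨ M ≤ nj) := by omega
    by_cases h2 : ((ni, nj) : Int × Int) ∈ vis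
    · refine ⟨[], vis, fun newA cnt hole => ?_, fun found => ?_, by simp⟩
      · simp only [pvDirA, ← hni, ← hnj]
        rw [if_neg hnotOOB]
        simp [h2, hin]
      · simp only [pvTryAdd]
        rw [if_neg (by rintro ⟨-, hmem, -⟩; exact hmem h2)]
        simp
    · by_cases h3 : (PySem.List.pyGet? ((PySem.List.pyGet? board ni).getD []) nj).getD 0 ≤ num
      · refine ⟨[(ni, nj)], PySem.Set.add vis (ni, nj),
          fun newA cnt hole => ?_, fun found => ?_, ?_⟩
        · simp only [pvDirA, ← hni, ← hnj]
          rw [if_neg hnotOOB]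
          simp [h2, h3, hin]
        · simp only [pvTryAdd]
          rw [if_pos ⟨hin, h2, h3⟩]
        · have hbox : ((ni, nj) : Int × Int) ∈ pvBox N M := by
            simp only [pvBox, Finset.mem_product, Finset.mem_Icc]
            omega
          simpa using pvFree_add_lt N M vis _ hbox h2
      · refine ⟨[], vis, fun newA cnt hole => ?_, fun found => ?_, by simp⟩
        · simp only [pvDirA, ← hni, ← hnj]
          rw [if_neg hnotOOB]
          simp [h2, h3, hin]
        · simp only [pvTryAdd]
          rw [if_neg (by rintro ⟨-, -, hle⟩; exact h3 hle)]
          simp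

-- fold over a list of directions (A) vs fold over the mapped neighbour list (B)
theorem pv_dirs (num : Int) (delta : List (List Int)) (N M : Int) (board : List (List Int))
    (c : Int × Int) (ds : List Int) (vis : List (Int × Int)) :
    ∃ (δ : List (Int × Int)) (vis' : List (Int × Int)),
      (∀ newA cnt hole, ds.foldl (pvDirA num delta N M board c) (vis, newA, cnt, hole) =
        (vis', newA ++ δ, cnt + (δ.length : Int), hole ||
          (ds.map (fun d =>
            (c.1 + ((PySem.List.pyGet? ((PySem.List.pyGet? delta d).getD []) 0).getD 0),
             c.2 + ((PySem.List.pyGet? ((PySem.List.pyGet? delta d).getD []) 1).getD 0)))).any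
            (fun p => ! pvInside N M p))) ∧
      (∀ found, (ds.map (fun d =>
            (c.1 + ((PySem.List.pyGet? ((PySem.List.pyGet? delta d).getD []) 0).getD 0),
             c.2 + ((PySem.List.pyGet? ((PySem.List.pyGet? delta d).getD []) 1).getD 0)))).foldl
          (pvTryAdd num N M board) (vis, found) = (vis', found ++ δ)) ∧
      pvFree N M vis' + δ.length ≤ pvFree N M vis := by
  induction ds generalizing vis with
  | nil => exact ⟨[], vis, by simp, by simp, by simp⟩
  | cons d ds ih =>
    obtain ⟨δ1, vis1, hA1, hB1, hc1⟩ := pv_dir num delta N M board c d vis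
    obtain ⟨δ2, vis2, hA2, hB2, hc2⟩ := ih vis1
    refine ⟨δ1 ++ δ2, vis2, fun newA cnt hole => ?_, fun found => ?_, by rw [List.length_append]; omega⟩
    · rw [List.foldl_cons, hA1, hA2]
      simp [List.append_assoc, List.any_cons, Bool.or_assoc, add_assoc]
    · rw [List.map_cons, List.foldl_cons, hB1, hB2]
      simp [List.append_assoc]

-- fold over a list of cells (one ring of the fill)
theorem pv_cells (num : Int) (delta : List (List Int)) (N M : Int) (board : List (List Int))
    (cells : List (Int × Int)) (vis : List (Int × Int)) :
    ∃ (δ : List (Int × Int)) (vis' : List (Int × Int)),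
      (∀ newA cnt hole, cells.foldl (pvStepA num delta N M board) (vis, newA, cnt, hole) =
        (vis', newA ++ δ, cnt + (δ.length : Int), hole || cells.any (pvBorderCell delta N M))) ∧
      (∀ found, cells.foldl
          (fun st cell => (pvNbrs delta cell.1 cell.2).foldl (pvTryAdd num N M board) st)
          (vis, found) = (vis', found ++ δ)) ∧
      pvFree N M vis' + δ.length ≤ pvFree N M vis := by
  induction cells generalizing vis with
  | nil => exact ⟨[], vis, by simp, by simp, by simp⟩
  | cons a cells ih =>
    obtain ⟨δ1, vis1, hA1, hB1, hc1⟩ := pv_dirs num delta N M board a (PySem.List.pyRange 0 4 1) vis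
    obtain ⟨δ2, vis2, hA2, hB2, hc2⟩ := ih vis1
    refine ⟨δ1 ++ δ2, vis2, fun newA cnt hole => ?_, fun found => ?_, by rw [List.length_append]; omega⟩
    · rw [List.foldl_cons]
      simp only [pvStepA]
      rw [hA1, hA2]
      simp [pvBorderCell, pvNbrs, List.append_assoc, List.any_cons, Bool.or_assoc, add_assoc]
    · have hB1' : ∀ found, (pvNbrs delta a.1 a.2).foldl (pvTryAdd num N M board) (vis, found) =
          (vis1, found ++ δ1) := fun found => by simpa [pvNbrs] using hB1 found
      simp only [List.foldl_cons]
      rw [hB1' found, hB2]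
      simp [List.append_assoc]

-- main correspondence: with enough fuel, A's loop result is B's component classified
theorem pv_main (num : Int) (delta : List (List Int)) (N M : Int) (board : List (List Int))
    (fuel : Nat) : ∀ (frontier vis : List (Int × Int)) (cnt : Int) (hole : Bool),
    (frontier ≠ [] → pvFree N M vis + 1 ≤ fuel) →
    pvLoopA num delta N M board fuel frontier vis cnt hole =
      if (hole || frontier.any (pvBorderCell delta N M) ||
          (pvFill num delta N M board fuel frontier vis).any (pvBorderCell delta N M)) then 0
      else cnt + ((pvFill num delta N M board fuel frontier vis).length : Int) := by
  induction fuel with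
  | zero =>
    intro frontier vis cnt hole h
    cases frontier with
    | nil => simp [pvLoopA, pvFill]
    | cons a fr => exact absurd (h (by simp)) (by omega)
  | succ f ih =>
    intro frontier vis cnt hole h
    cases frontier with
    | nil => simp [pvLoopA, pvFill]
    | cons a fr =>
      obtain ⟨δ, vis', hA, hB, hc⟩ := pv_cells num delta N M board ((a :: fr).reverse) vis
      have hfuel : pvFree N M vis + 1 ≤ f + 1 := h (by simp)
      simp only [pvLoopA, pvFill, pvExpand]
      rw [hA [] cnt hole, hB []]
      simp only [List.nil_append]
      rw [ih δ vis' (cnt + (δ.length : Int)) (hole || ((a :: fr).reverse).any (pvBorderCell delta N M))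
        (fun hne => by
          have : 1 ≤ δ.length := List.length_pos_iff.mpr hne
          omega)]
      simp only [List.any_reverse, List.any_append, Bool.or_assoc, add_assoc, List.any_cons,
        List.length_append, Nat.cast_add]

-- ===== VERDICT (by name: the statement is the Claim_ definition above) =====
theorem chk_bfs_spec : Claim_equal_chk_bfs := by
  intro num si sj delta N M board visited _ _
  simp only [Spec_chk_bfs, chk_bfs, chk_bfs_alt]
  have hfree := pvFree_le_grid N M (PySem.Set.add visited (si, sj))
  rw [pv_main num delta N M board (N.toNat * M.toNat + 1) [(si, sj)]
    (PySem.Set.add visited (si, sj)) 1 false (fun _ => by omega)]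
  simp [add_comm]
  simp only [Bool.false_or, Bool.or_false]
  rfl
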